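-- pv_equiv track=rewrite | github.com/BrayanSolanoF/EjerciciosPython | Ejercicios de quiz&examen/Cant_digitos_en_lista.py | cant_digitos_aux
-- ===== SOURCE A (Python) =====
-- def cant_digitos_aux(lista, lista2):
--     if lista == []:
--         return lista2
--     elif lista[0] == 0:
--         return cant_digitos_aux(lista[1:], lista2 + [1] )
--     elif lista[0] != 0:
--         return cant_digitos_aux(lista[1:], lista2+[lista[0]])
--     else: return cant_digitos_aux(lista[1:], lista2)
-- ===== SOURCE B (Python) =====
-- def cant_digitos_aux(lista, lista2):
--     return lista2 + [1 if x == 0 else x for x in lista]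
-- ===== Notes on version B (the rewrite author's own statement) =====
-- stated objective: simpler
-- what changed: Replaced the tail recursion that rebuilds the accumulator with quadratic repeated concatenations by a single list comprehension appended once to lista2.
import Mathlib
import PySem

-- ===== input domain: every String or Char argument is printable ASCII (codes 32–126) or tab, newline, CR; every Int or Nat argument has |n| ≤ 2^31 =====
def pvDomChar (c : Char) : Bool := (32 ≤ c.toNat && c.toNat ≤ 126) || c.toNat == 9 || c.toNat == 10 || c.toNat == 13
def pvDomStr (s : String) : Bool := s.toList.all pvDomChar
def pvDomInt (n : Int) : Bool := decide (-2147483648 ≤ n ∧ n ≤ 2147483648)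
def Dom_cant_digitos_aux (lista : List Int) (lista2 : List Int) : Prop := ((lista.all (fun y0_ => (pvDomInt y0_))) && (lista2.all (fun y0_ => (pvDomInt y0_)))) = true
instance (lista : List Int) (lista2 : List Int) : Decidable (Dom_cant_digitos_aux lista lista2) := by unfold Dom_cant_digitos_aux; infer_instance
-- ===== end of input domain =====

-- B replaces A's accumulator recursion (quadratic repeated list concatenation) by one map appended once to lista2.
-- ===== PORT A =====
def cant_digitos_aux (lista : List Int) (lista2 : List Int) : List Int :=
  match lista with
  | [] => lista2
  | x :: rest =>
    if x = 0 then cant_digitos_aux rest (lista2 ++ [1])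
    else if x ≠ 0 then cant_digitos_aux rest (lista2 ++ [x])
    else cant_digitos_aux rest lista2

-- ===== PORT B =====
-- B: single comprehension appended once to lista2
def cant_digitos_aux_alt (lista : List Int) (lista2 : List Int) : List Int :=
  lista2 ++ lista.map (fun x => if x = 0 then 1 else x)

-- ===== PRECONDITION & SPEC =====
def Spec_cant_digitos_aux (lista : List Int) (lista2 : List Int) (out : List Int) : Prop := out = cant_digitos_aux_alt lista lista2
instance (lista : List Int) (lista2 : List Int) (out : List Int) : Decidable (Spec_cant_digitos_aux lista lista2 out) := by unfold Spec_cant_digitos_aux; infer_instance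

-- ===== CLAIM (what is proved, stated in full; the proofs are below) =====
def Claim_equal_cant_digitos_aux : Prop := ∀ (lista : List Int) (lista2 : List Int), Dom_cant_digitos_aux lista lista2 → Spec_cant_digitos_aux lista lista2 (cant_digitos_aux lista lista2)

-- ===== LEMMAS AND PROOFS =====

-- ===== VERDICT (by name: the statement is the Claim_ definition above) =====
theorem cant_digitos_aux_aux (lista lista2 : List Int) :
    cant_digitos_aux lista lista2 = lista2 ++ lista.map (fun x => if x = 0 then 1 else x) := by
  induction lista generalizing lista2 with
  | nil => simp [cant_digitos_aux]
  | cons x rest ih =>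
    by_cases hx : x = 0 <;> simp [cant_digitos_aux, hx, ih]

theorem cant_digitos_aux_spec : Claim_equal_cant_digitos_aux := by
  intro lista lista2 _
  unfold Spec_cant_digitos_aux cant_digitos_aux_alt
  exact cant_digitos_aux_aux lista lista2
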